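-- pv_equiv track=rewrite | github.com/gindij/stanford-cs336-assignment1-basics | cs336_basics/train_bpe.py | apply_merge_to_word
-- ===== SOURCE A (Python) =====
-- from typing import Dict, Generator, Iterable, List, Optional, Set, Tuple
--
-- def apply_merge_to_word(
--     word: Tuple[int, ...], pair_to_merge: Tuple[int, int], new_ix: int
-- ) -> Tuple[int]:
--     if len(word) == 1:
--         return word
--     new_word = []
--     i = 0
--     while i < len(word):
--         if (
--             i < len(word) - 1
--             and word[i] == pair_to_merge[0]
--             and word[i + 1] == pair_to_merge[1]
--         ):
--             new_word.append(new_ix)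
--             i += 2
--         else:
--             new_word.append(word[i])
--             i += 1
--     return tuple(new_word)
-- ===== SOURCE B (Python) =====
-- def apply_merge_to_word(word, pair_to_merge, new_ix):
--     stack = []
--     just_merged = False
--     for c in word:
--         if stack and not just_merged and stack[-1] == pair_to_merge[0] and c == pair_to_merge[1]:
--             stack[-1] = new_ix
--             just_merged = True
--         else:
--             stack.append(c)
--             just_merged = False
--     return tuple(stack)
-- ===== Notes on version B (the rewrite author's own statement) =====
-- stated objective: alternative
-- what changed: Replaces the index/look-ahead while-loop over word with a single left-to-right stack reduction: each token is pushed, and when the top of the stack equals pair[0] and the next token equals pair[1] (and the top was not itself just created by a merge) the top is replaced by new_ix.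
import Mathlib
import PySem

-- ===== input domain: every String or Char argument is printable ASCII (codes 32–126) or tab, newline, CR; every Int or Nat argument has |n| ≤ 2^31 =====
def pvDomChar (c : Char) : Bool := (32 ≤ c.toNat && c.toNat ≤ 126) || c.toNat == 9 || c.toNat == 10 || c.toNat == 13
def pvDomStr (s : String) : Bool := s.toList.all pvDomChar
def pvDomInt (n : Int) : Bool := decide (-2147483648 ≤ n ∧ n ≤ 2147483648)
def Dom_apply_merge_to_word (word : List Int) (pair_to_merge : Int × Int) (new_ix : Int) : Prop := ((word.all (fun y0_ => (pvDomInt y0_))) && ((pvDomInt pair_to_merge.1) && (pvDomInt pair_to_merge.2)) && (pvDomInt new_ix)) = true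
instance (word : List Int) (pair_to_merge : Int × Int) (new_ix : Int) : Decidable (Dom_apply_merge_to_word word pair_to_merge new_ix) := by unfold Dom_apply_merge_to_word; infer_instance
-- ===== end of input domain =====

-- B replaces A's index/look-ahead while-loop with a single-pass look-behind stack
-- reduction (objective: alternative); return values proved equal on all inputs.


-- ===== PORT A =====
-- A's while-loop over index i: at each step it looks AHEAD at word[i], word[i+1];
-- ported as structural recursion on the remaining suffix (i < len-1 ↔ two elements remain).
def applyGoA (pair_to_merge : Int × Int) (new_ix : Int) : List Int → List Int
  | [] => []
  | [a] => [a]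
  | a :: b :: rest =>
    if a = pair_to_merge.1 ∧ b = pair_to_merge.2 then
      new_ix :: applyGoA pair_to_merge new_ix rest
    else
      a :: applyGoA pair_to_merge new_ix (b :: rest)

def apply_merge_to_word (word : List Int) (pair_to_merge : Int × Int) (new_ix : Int) : List Int :=
  if word.length = 1 then word
  else applyGoA pair_to_merge new_ix word

-- ===== PORT B =====
-- B's for-loop over word with state (stack, just_merged).
def altLoop (pair_to_merge : Int × Int) (new_ix : Int) : List Int → List Int → Bool → List Int
  | [], stack, _ => stack
  | c :: cs, stack, jm =>
    if stack ≠ [] ∧ jm = false ∧ stack.getLast? = some pair_to_merge.1 ∧ c = pair_to_merge.2 then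
      altLoop pair_to_merge new_ix cs (stack.dropLast ++ [new_ix]) true
    else
      altLoop pair_to_merge new_ix cs (stack ++ [c]) false

def apply_merge_to_word_alt (word : List Int) (pair_to_merge : Int × Int) (new_ix : Int) : List Int :=
  altLoop pair_to_merge new_ix word [] false

-- ===== PRECONDITION & SPEC =====
def Spec_apply_merge_to_word (word : List Int) (pair_to_merge : Int × Int) (new_ix : Int) (out : List Int) : Prop := out = apply_merge_to_word_alt word pair_to_merge new_ix
instance (word : List Int) (pair_to_merge : Int × Int) (new_ix : Int) (out : List Int) : Decidable (Spec_apply_merge_to_word word pair_to_merge new_ix out) := by unfold Spec_apply_merge_to_word; infer_instance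

-- ===== CLAIM (what is proved, stated in full; the proofs are below) =====
def Claim_equal_apply_merge_to_word : Prop := ∀ (word : List Int) (pair_to_merge : Int × Int) (new_ix : Int), Dom_apply_merge_to_word word pair_to_merge new_ix → Spec_apply_merge_to_word word pair_to_merge new_ix (apply_merge_to_word word pair_to_merge new_ix)

-- ===== LEMMAS AND PROOFS =====

-- Invariant linking B's stack loop to A's look-ahead recursion:
-- (1) after a merge (jm = true), the stack is committed verbatim;
-- (2) with jm = false and nonempty stack init ++ [t], the top t may still merge with
--     the next token, exactly as A's recursion on t :: rest.
theorem altLoop_goA (p : Int × Int) (n : Int) (rest : List Int) :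
    (∀ acc, altLoop p n rest acc true = acc ++ applyGoA p n rest) ∧
    (∀ init t, altLoop p n rest (init ++ [t]) false = init ++ applyGoA p n (t :: rest)) := by
  induction rest with
  | nil =>
      constructor
      · intro acc; simp [altLoop, applyGoA]
      · intro init t; simp [altLoop, applyGoA]
  | cons c cs ih =>
      constructor
      · intro acc
        have h := ih.2 acc c
        simpa [altLoop] using h
      · intro init t
        by_cases hm : t = p.1 ∧ c = p.2
        · have h1 := ih.1 (init ++ [n])
          simp [altLoop, hm, applyGoA, h1]
        · have h2 := ih.2 (init ++ [t]) c
          have hcond : ¬ ((init ++ [t]) ≠ [] ∧ True ∧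
              (init ++ [t]).getLast? = some p.1 ∧ c = p.2) := by
            simp only [List.getLast?_concat]
            intro ⟨_, _, ht, hc⟩
            exact hm ⟨by simpa using ht, hc⟩
          simp only [altLoop]
          rw [if_neg hcond]
          simp only [applyGoA, if_neg hm]
          simpa using h2
  
theorem alt_eq_goA (p : Int × Int) (n : Int) (word : List Int) :
    apply_merge_to_word_alt word p n = applyGoA p n word := by
  cases word with
  | nil => simp [apply_merge_to_word_alt, altLoop, applyGoA]
  | cons c cs =>
      have h := (altLoop_goA p n cs).2 [] c
      simpa [apply_merge_to_word_alt, altLoop] using h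

-- ===== VERDICT (by name: the statement is the Claim_ definition above) =====
theorem apply_merge_to_word_spec : Claim_equal_apply_merge_to_word := by
  intro word p n _
  unfold Spec_apply_merge_to_word apply_merge_to_word
  rw [alt_eq_goA]
  split
  · next h =>
      match word, h with
      | [a], _ => simp [applyGoA]
  · rfl
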